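-- pv_equiv track=rewrite | github.com/SashaV21/Algorithm | 2.0/Lection 7 YANDEX/ex_6_fail.py | is_parking_full
-- ===== SOURCE A (Python) =====
-- def is_parking_full(cars, n):
--     events = []
--     for i in range(len(cars)):
--         tin, tout, place_from, place_to = cars[i]
--         events.append((tin, 1, place_to - place_from + 1, i))
--         events.append((tout, -1, place_to - place_from + 1, i))
--     events.sort()
--     occupied = 0
--     now_cars = 0
--     min_cars = len(cars) + 1
--     car_nums = set()
--     best_car_nums = set()
--     for i in range(len(events)):
--         if events[i][1] == -1:
--             occupied -= events[i][2]
--             now_cars -= 1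
--             car_nums.remove(events[i][3])
--         elif events[i][1] == 1:
--             occupied += events[i][2]
--             now_cars += 1
--             car_nums.add(events[i][3])
--         if occupied == n and now_cars < min_cars:
--             best_car_nums = car_nums.copy()
--             min_cars = now_cars
--     return best_car_nums
-- ===== SOURCE B (Python) =====
-- def is_parking_full(cars, n):
--     events = []
--     for i in range(len(cars)):
--         tin, tout, place_from, place_to = cars[i]
--         events.append((tin, 1, place_to - place_from + 1, i))
--         events.append((tout, -1, place_to - place_from + 1, i))
--     events.sort()
--     # Pass 1: sweep with counters and the set of currently parked cars, but never
--     # copy the set -- only remember the index of the last improvement.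
--     occupied = 0
--     now_cars = 0
--     min_cars = len(cars) + 1
--     active = set()
--     best_index = None
--     for i, (t, typ, size, idx) in enumerate(events):
--         occupied += typ * size
--         now_cars += typ
--         if typ == 1:
--             active.add(idx)
--         else:
--             active.remove(idx)
--         if occupied == n and now_cars < min_cars:
--             best_index = i
--             min_cars = now_cars
--     if best_index is None:
--         return set()
--     # Pass 2: rebuild the answer set once, by replaying the winning prefix.
--     result = set()
--     for (t, typ, size, idx) in events[:best_index + 1]:
--         if typ == 1:
--             result.add(idx)
--         else:
--             result.remove(idx)
--     return result
-- ===== Notes on version B (the rewrite author's own statement) =====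
-- stated objective: alternative
-- what changed: The sweep no longer copies the live set at every improvement: it only records the index of the last improving event, and the answer set is rebuilt once at the end by replaying the winning prefix of the sorted events.
import Mathlib
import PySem

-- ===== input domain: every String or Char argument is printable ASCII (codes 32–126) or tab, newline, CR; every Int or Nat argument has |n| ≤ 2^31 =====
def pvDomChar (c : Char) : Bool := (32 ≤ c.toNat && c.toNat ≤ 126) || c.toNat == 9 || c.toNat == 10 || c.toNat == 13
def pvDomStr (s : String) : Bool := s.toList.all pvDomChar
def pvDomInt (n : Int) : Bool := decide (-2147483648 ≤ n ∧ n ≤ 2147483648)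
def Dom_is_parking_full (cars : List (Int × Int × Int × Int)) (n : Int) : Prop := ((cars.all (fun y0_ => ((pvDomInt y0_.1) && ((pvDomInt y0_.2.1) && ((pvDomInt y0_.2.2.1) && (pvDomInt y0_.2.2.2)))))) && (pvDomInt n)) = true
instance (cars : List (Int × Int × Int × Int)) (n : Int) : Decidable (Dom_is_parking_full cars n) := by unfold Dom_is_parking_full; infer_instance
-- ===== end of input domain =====

-- B replaces A's live answer set (copied at every improvement) by a counters-only sweep that
-- records the index of the last improvement, plus a single replay of the winning prefix.

-- ===== PORT A =====
-- Python 'events.sort()' sorts 4-tuples (time, type, size, idx) lexicographically.  On the Dom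
-- bounds (|time| ≤ 2^31, |size| ≤ 2^32+1, type ∈ {1,-1}) that order is exactly the stable sort by
-- the single integer key (time*4 + type)*2^34 + size: the idx component never decides a tie,
-- because events with equal (time, type, size) occur in the original list in increasing idx order
-- and the sort is stable.
def pvKey (e : Int × Int × Int × Int) : Int := (e.1 * 4 + e.2.1) * 17179869184 + e.2.2.1

-- the two appends of the Python event-building loop, then events.sort()
def pvEvents (cars : List (Int × Int × Int × Int)) : List (Int × Int × Int × Int) :=
  PySem.List.sorted
    ((PySem.List.enumerate cars 0).foldl (fun acc ic =>
        acc ++ [(ic.2.1, 1, ic.2.2.2.2 - ic.2.2.2.1 + 1, ic.1),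
                (ic.2.2.1, -1, ic.2.2.2.2 - ic.2.2.2.1 + 1, ic.1)]) [])
    pvKey false

-- A's sweep: state (occupied, now_cars, min_cars, car_nums, best_car_nums);
-- set.remove is PySem.Set.remove? (none = KeyError, which aborts the whole run as 'none')
def loopA (n : Int) : List (Int × Int × Int × Int) → Int → Int → Int → List Int → List Int → Option (List Int)
  | [], _, _, _, _, best => some best
  | e :: rest, occ, now, minc, cs, best =>
    if e.2.1 = -1 then
      match PySem.Set.remove? cs e.2.2.2 with
      | none => none
      | some cs' =>
        if occ - e.2.2.1 = n ∧ now - 1 < minc then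
          loopA n rest (occ - e.2.2.1) (now - 1) (now - 1) cs' cs'
        else loopA n rest (occ - e.2.2.1) (now - 1) minc cs' best
    else if e.2.1 = 1 then
      if occ + e.2.2.1 = n ∧ now + 1 < minc then
        loopA n rest (occ + e.2.2.1) (now + 1) (now + 1) (PySem.Set.add cs e.2.2.2) (PySem.Set.add cs e.2.2.2)
      else loopA n rest (occ + e.2.2.1) (now + 1) minc (PySem.Set.add cs e.2.2.2) best
    else
      if occ = n ∧ now < minc then loopA n rest occ now now cs cs
      else loopA n rest occ now minc cs best

def is_parking_full (cars : List (Int × Int × Int × Int)) (n : Int) : List Int :=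
  (loopA n (pvEvents cars) 0 0 ((cars.length : Int) + 1) PySem.Set.empty PySem.Set.empty).getD []

-- ===== PORT B =====
-- pass 1 of Source B: the sweep keeps the counters and the set of currently parked cars,
-- but only remembers the enumerate index of the last improvement (no copy);
-- set.remove = PySem.Set.remove? (none = KeyError, aborting the run as 'none')
def pass1 (n : Int) : List (Int × Int × Int × Int) → Int → Int → Int → List Int → Nat → Option Nat → Option (Option Nat)
  | [], _, _, _, _, _, best => some best
  | e :: rest, occ, now, minc, act, i, best =>
    if e.2.1 = 1 then
      if occ + e.2.1 * e.2.2.1 = n ∧ now + e.2.1 < minc then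
        pass1 n rest (occ + e.2.1 * e.2.2.1) (now + e.2.1) (now + e.2.1) (PySem.Set.add act e.2.2.2) (i + 1) (some i)
      else pass1 n rest (occ + e.2.1 * e.2.2.1) (now + e.2.1) minc (PySem.Set.add act e.2.2.2) (i + 1) best
    else
      match PySem.Set.remove? act e.2.2.2 with
      | none => none
      | some act' =>
        if occ + e.2.1 * e.2.2.1 = n ∧ now + e.2.1 < minc then
          pass1 n rest (occ + e.2.1 * e.2.2.1) (now + e.2.1) (now + e.2.1) act' (i + 1) (some i)
        else pass1 n rest (occ + e.2.1 * e.2.2.1) (now + e.2.1) minc act' (i + 1) best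

-- pass 2 of Source B: replay the winning prefix into a fresh set
def replayB : List (Int × Int × Int × Int) → List Int → Option (List Int)
  | [], r => some r
  | e :: rest, r =>
    if e.2.1 = 1 then replayB rest (PySem.Set.add r e.2.2.2)
    else
      match PySem.Set.remove? r e.2.2.2 with
      | none => none
      | some r' => replayB rest r'

def is_parking_full_alt (cars : List (Int × Int × Int × Int)) (n : Int) : List Int :=
  match pass1 n (pvEvents cars) 0 0 ((cars.length : Int) + 1) PySem.Set.empty 0 none with
  | none => PySem.Set.empty        -- Python B raises KeyError here (possible only outside Pre_)
  | some none => PySem.Set.empty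
  | some (some k) => (replayB ((pvEvents cars).take (k + 1)) PySem.Set.empty).getD []
                -- events[:k+1] with k ≥ 0 is exactly take (k+1)

-- ===== PRECONDITION & SPEC =====
-- Pre_ excludes exactly the inputs on which Python A raises KeyError: if some car has
-- tout ≤ tin, its departure event sorts before its arrival and car_nums.remove fails.
-- (Python B raises KeyError on exactly the same inputs.)
def Pre_is_parking_full (cars : List (Int × Int × Int × Int)) (n : Int) : Prop :=
  ∀ c ∈ cars, c.1 < c.2.1
instance (cars : List (Int × Int × Int × Int)) (n : Int) : Decidable (Pre_is_parking_full cars n) := by unfold Pre_is_parking_full; infer_instance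

def pvWitness_is_parking_full : (List (Int × Int × Int × Int)) × Int := ([(0, 2, 1, 3), (1, 4, 4, 5)], 3)

def Spec_is_parking_full (cars : List (Int × Int × Int × Int)) (n : Int) (out : List Int) : Prop := out = is_parking_full_alt cars n
instance (cars : List (Int × Int × Int × Int)) (n : Int) (out : List Int) : Decidable (Spec_is_parking_full cars n out) := by unfold Spec_is_parking_full; infer_instance

-- ===== CLAIM (what is proved, stated in full; the proofs are below) =====
def Claim_equal_is_parking_full : Prop := ∀ (cars : List (Int × Int × Int × Int)) (n : Int), Dom_is_parking_full cars n → Pre_is_parking_full cars n → Spec_is_parking_full cars n (is_parking_full cars n)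

-- ===== LEMMAS AND PROOFS =====

-- B's final answer as a function of pass 1's recorded index
def pvBOf (es : List (Int × Int × Int × Int)) (b : Option Nat) : List Int :=
  match b with
  | none => PySem.Set.empty
  | some k => (replayB (es.take (k + 1)) PySem.Set.empty).getD []

lemma replayB_append (xs ys : List (Int × Int × Int × Int)) (r : List Int) :
    replayB (xs ++ ys) r = (replayB xs r).bind (fun r' => replayB ys r') := by
  induction xs generalizing r with
  | nil => simp [replayB]
  | cons e xs ih =>
    simp only [List.cons_append, replayB]
    split
    · exact ih _
    · cases PySem.Set.remove? r e.2.2.2 with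
      | none => rfl
      | some r' => exact ih r'

lemma take_len_succ (pre rest : List (Int × Int × Int × Int)) (e : Int × Int × Int × Int) :
    (pre ++ e :: rest).take (pre.length + 1) = pre ++ [e] := by
  rw [List.take_append]
  simp

-- the main simulation: A's sweep against B's pass 1, over any common suffix.
-- The invariant is that the live set equals the replay of the consumed prefix,
-- and A's stored best set equals the replay of the prefix up to the recorded index.
lemma loopA_eq_pass1 (es0 : List (Int × Int × Int × Int)) (n : Int)
    (hty : ∀ e ∈ es0, e.2.1 = 1 ∨ e.2.1 = -1) :
    ∀ suf pre occ now minc cs bIdx, es0 = pre ++ suf →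
      replayB pre PySem.Set.empty = some cs →
      loopA n suf occ now minc cs (pvBOf es0 bIdx) =
        (pass1 n suf occ now minc cs pre.length bIdx).map (pvBOf es0) := by
  intro suf
  induction suf with
  | nil => intro pre occ now minc cs bIdx _ _; simp [loopA, pass1]
  | cons e rest ih =>
    intro pre occ now minc cs bIdx hsplit hrep
    have hmem : e ∈ es0 := hsplit ▸ List.mem_append.mpr (Or.inr (List.mem_cons_self))
    have hpre1 : replayB (pre ++ [e]) PySem.Set.empty =
        (replayB pre PySem.Set.empty).bind (fun r => replayB [e] r) := replayB_append _ _ _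
    have hsplit' : es0 = (pre ++ [e]) ++ rest := by rw [hsplit, List.append_assoc]; rfl
    have hlen' : (pre ++ [e]).length = pre.length + 1 := by simp
    have htake : es0.take (pre.length + 1) = pre ++ [e] := by rw [hsplit]; exact take_len_succ _ _ _
    rcases hty e hmem with ht1 | htm
    · -- arrival event
      have htm' : ¬ (e.2.1 = -1) := by rw [ht1]; norm_num
      have hrep' : replayB (pre ++ [e]) PySem.Set.empty = some (PySem.Set.add cs e.2.2.2) := by
        rw [hpre1, hrep]; simp [replayB, ht1]
      simp only [loopA, if_neg htm', if_pos ht1, pass1]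
      rw [show occ + e.2.1 * e.2.2.1 = occ + e.2.2.1 by rw [ht1]; ring,
          show now + e.2.1 = now + 1 by rw [ht1]]
      by_cases hc : occ + e.2.2.1 = n ∧ now + 1 < minc
      · rw [if_pos hc, if_pos hc]
        have hbest : PySem.Set.add cs e.2.2.2 = pvBOf es0 (some pre.length) := by
          simp only [pvBOf, htake, hrep']; rfl
        rw [hbest] at hrep' ⊢
        rw [← hlen']
        exact ih (pre ++ [e]) _ _ _ _ (some pre.length) hsplit' hrep'
      · rw [if_neg hc, if_neg hc, ← hlen']
        exact ih (pre ++ [e]) _ _ _ _ bIdx hsplit' hrep'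
    · -- departure event: both sides consult the same remove?
      have ht1' : ¬ (e.2.1 = 1) := by rw [htm]; norm_num
      simp only [loopA, if_pos htm, if_neg ht1', pass1]
      rw [show occ + e.2.1 * e.2.2.1 = occ - e.2.2.1 by rw [htm]; ring,
          show now + e.2.1 = now - 1 by rw [htm]; ring]
      cases hrem : PySem.Set.remove? cs e.2.2.2 with
      | none => rfl
      | some cs' =>
        dsimp only
        have hrep' : replayB (pre ++ [e]) PySem.Set.empty = some cs' := by
          rw [hpre1, hrep]
          simp [replayB, ht1', hrem]
        by_cases hc : occ - e.2.2.1 = n ∧ now - 1 < minc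
        · rw [if_pos hc, if_pos hc]
          have hbest : cs' = pvBOf es0 (some pre.length) := by
            simp only [pvBOf, htake, hrep']; rfl
          rw [hbest] at hrep' ⊢
          rw [← hlen']
          exact ih (pre ++ [e]) _ _ _ _ (some pre.length) hsplit' hrep'
        · rw [if_neg hc, if_neg hc, ← hlen']
          exact ih (pre ++ [e]) _ _ _ _ bIdx hsplit' hrep'

-- the raw (unsorted) event list is a flatMap over enumerate
lemma raw_eq_flatMap (cars : List (Int × Int × Int × Int)) :
    ((PySem.List.enumerate cars 0).foldl (fun acc ic =>
        acc ++ [(ic.2.1, 1, ic.2.2.2.2 - ic.2.2.2.1 + 1, ic.1),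
                (ic.2.2.1, -1, ic.2.2.2.2 - ic.2.2.2.1 + 1, ic.1)]) []) =
    (PySem.List.enumerate cars 0).flatMap (fun ic =>
        [(ic.2.1, 1, ic.2.2.2.2 - ic.2.2.2.1 + 1, ic.1),
         (ic.2.2.1, -1, ic.2.2.2.2 - ic.2.2.2.1 + 1, ic.1)]) := by
  simpa using PySem.List.foldl_append_eq_flatMap
    (fun ic => [(ic.2.1, 1, ic.2.2.2.2 - ic.2.2.2.1 + 1, ic.1),
                (ic.2.2.1, -1, ic.2.2.2.2 - ic.2.2.2.1 + 1, ic.1)])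
    (PySem.List.enumerate cars 0) []

-- ===== VERDICT (by name: the statement is the Claim_ definition above) =====
theorem is_parking_full_spec : Claim_equal_is_parking_full := by
  intro cars n _ _
  unfold Spec_is_parking_full is_parking_full is_parking_full_alt
  have hperm : (pvEvents cars).Perm ((PySem.List.enumerate cars 0).foldl (fun acc ic =>
      acc ++ [(ic.2.1, 1, ic.2.2.2.2 - ic.2.2.2.1 + 1, ic.1),
              (ic.2.2.1, -1, ic.2.2.2.2 - ic.2.2.2.1 + 1, ic.1)]) []) :=
    PySem.List.sorted_perm _ pvKey false
  have hty : ∀ e ∈ pvEvents cars, e.2.1 = 1 ∨ e.2.1 = -1 := by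
    intro e he
    have he' := hperm.mem_iff.mp he
    rw [raw_eq_flatMap] at he'
    obtain ⟨ic, _, hmem⟩ := List.mem_flatMap.mp he'
    rcases List.mem_cons.mp hmem with h | h
    · left; rw [h]
    · right
      rcases List.mem_cons.mp h with h' | h'
      · rw [h']
      · exact absurd h' (List.not_mem_nil)
  have hmain := loopA_eq_pass1 (pvEvents cars) n hty (pvEvents cars) [] 0 0
      ((cars.length : Int) + 1) PySem.Set.empty none rfl (by simp [replayB, PySem.Set.empty])
  simp only [List.length_nil] at hmain
  have hb0 : pvBOf (pvEvents cars) none = PySem.Set.empty := rfl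
  rw [hb0] at hmain
  rw [hmain]
  cases pass1 n (pvEvents cars) 0 0 ((cars.length : Int) + 1) PySem.Set.empty 0 none with
  | none => simp [PySem.Set.empty]
  | some b => cases b with
    | none => simp [pvBOf, PySem.Set.empty]
    | some k => simp [pvBOf]
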